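-- pv_equiv track=rewrite | github.com/alonsovch/ruuf-dev-task | main.py | fit_rectangles
-- ===== SOURCE A (Python) =====
-- def fit_rectangles(x, y, a, b):
--     if x<=0 or y<=0 or a<=0 or b<=0:
--         return 0
--     if x<a or y<b:
--         return 0
--
--     cols = y//b
--     rows = x//a
--     total_straight_rectangles = cols*rows
--
--     flipped_cols = y//a
--     flipped_rows = x//b
--     total_flipped_rectangles = flipped_cols*flipped_rows
--
--     if total_straight_rectangles > total_flipped_rectangles:
--         leftover_rectangle_width = rows*a
--         leftover_rectangle_height = y - cols*b
--         return total_straight_rectangles + fit_rectangles(leftover_rectangle_width, leftover_rectangle_height, a, b)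
--     else:
--         leftover_rectangle_width = x - flipped_rows*b
--         leftover_rectangle_height = flipped_cols*a
--         return total_flipped_rectangles + fit_rectangles(leftover_rectangle_width, leftover_rectangle_height, a, b)
-- ===== SOURCE B (Python) =====
-- def fit_rectangles(x, y, a, b):
--     def grid(w, h, u, v):
--         return (h // v) * (w // u)
--     total = 0
--     while a > 0 and b > 0 and a <= x and b <= y:
--         straight = grid(x, y, a, b)
--         flipped = grid(x, y, b, a)
--         if straight > flipped:
--             total += straight
--             x, y = (x // a) * a, y % b
--         else:
--             total += flipped
--             x, y = x % b, (y // a) * a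
--     return total
-- ===== Notes on version B (the rewrite author's own statement) =====
-- stated objective: alternative
-- what changed: Replaces A's greedy recursion with an iterative while-loop carrying a running total, fuses A's two guard chains into a single loop condition, and computes both orientations through one shared grid(w,h,u,v) helper called with swapped tile sides instead of duplicated cols/rows formulas.
import Mathlib
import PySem

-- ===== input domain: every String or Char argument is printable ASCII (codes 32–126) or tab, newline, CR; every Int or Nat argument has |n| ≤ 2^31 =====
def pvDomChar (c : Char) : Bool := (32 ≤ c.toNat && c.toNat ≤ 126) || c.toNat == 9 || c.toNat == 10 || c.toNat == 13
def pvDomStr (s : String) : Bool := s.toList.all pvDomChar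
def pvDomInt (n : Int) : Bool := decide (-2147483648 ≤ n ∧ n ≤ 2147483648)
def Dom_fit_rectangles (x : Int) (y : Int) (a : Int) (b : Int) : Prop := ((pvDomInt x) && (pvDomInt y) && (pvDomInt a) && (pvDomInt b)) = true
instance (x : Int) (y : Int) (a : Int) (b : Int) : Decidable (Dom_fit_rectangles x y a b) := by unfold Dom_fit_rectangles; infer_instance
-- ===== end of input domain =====

-- B replaces A's greedy recursion by an iterative accumulator loop with a fused guard and a
-- shared per-orientation grid helper (objective: alternative decomposition, same cost).

-- ===== PORT A =====
-- literal transliteration of the recursive Python A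
def fit_rectangles (x : Int) (y : Int) (a : Int) (b : Int) : Int :=
  if x ≤ 0 ∨ y ≤ 0 ∨ a ≤ 0 ∨ b ≤ 0 then 0
  else if x < a ∨ y < b then 0
  else
    let cols := PySem.Int.floordiv y b
    let rows := PySem.Int.floordiv x a
    let total_straight := cols * rows
    let flipped_cols := PySem.Int.floordiv y a
    let flipped_rows := PySem.Int.floordiv x b
    let total_flipped := flipped_cols * flipped_rows
    if total_straight > total_flipped then
      total_straight + fit_rectangles (rows * a) (y - cols * b) a b
    else
      total_flipped + fit_rectangles (x - flipped_rows * b) (flipped_cols * a) a b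
termination_by ((if b ≤ y then 1 else 0) + (if b ≤ x then 1 else 0) : Nat)
decreasing_by
  · -- straight branch: new y = y - cols*b = y mod b < b, new x = rows*a ≤ x
    rename_i h1 h2 _
    have hx : 0 < x := by omega
    have hy : 0 < y := by omega
    have ha : 0 < a := by omega
    have hb : 0 < b := by omega
    have hax : a ≤ x := by omega
    have hby : b ≤ y := by omega
    have hmb := PySem.Int.floordiv_mul_add_mod y b
    have hmb0 := PySem.Int.mod_nonneg y hb
    have hmb1 := PySem.Int.mod_lt y hb
    have hma := PySem.Int.floordiv_mul_add_mod x a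
    have hma0 := PySem.Int.mod_nonneg x ha
    split_ifs <;> omega
  · -- flipped branch: tf ≥ ts ≥ 1 forces b ≤ x; new x = x mod b < b, new y = fcols*a ≤ y
    rename_i h1 h2 h3
    simp only [total_straight, total_flipped, cols, rows, flipped_cols, flipped_rows] at h3
    have hx : 0 < x := by omega
    have hy : 0 < y := by omega
    have ha : 0 < a := by omega
    have hb : 0 < b := by omega
    have hax : a ≤ x := by omega
    have hby : b ≤ y := by omega
    have hcols : 1 ≤ PySem.Int.floordiv y b := by
      rw [PySem.Int.le_floordiv_iff_mul_le hb]; omega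
    have hrows : 1 ≤ PySem.Int.floordiv x a := by
      rw [PySem.Int.le_floordiv_iff_mul_le ha]; omega
    have hts : 1 ≤ PySem.Int.floordiv y b * PySem.Int.floordiv x a := by
      have := mul_le_mul hcols hrows (by norm_num) (by omega)
      simpa using this
    have hfc : 0 ≤ PySem.Int.floordiv y a := by
      rw [PySem.Int.le_floordiv_iff_mul_le ha]; omega
    have hfr : 1 ≤ PySem.Int.floordiv x b := by
      by_contra hcon
      push Not at hcon
      have hfr0 : PySem.Int.floordiv x b ≤ 0 := by omega
      have : PySem.Int.floordiv y a * PySem.Int.floordiv x b ≤ 0 :=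
        mul_nonpos_of_nonneg_of_nonpos hfc hfr0
      omega
    have hbx : b ≤ x := by
      have := (PySem.Int.le_floordiv_iff_mul_le hb (q := 1) (a := x)).mp hfr
      omega
    have hmb := PySem.Int.floordiv_mul_add_mod x b
    have hmb0 := PySem.Int.mod_nonneg x hb
    have hmb1 := PySem.Int.mod_lt x hb
    have hma := PySem.Int.floordiv_mul_add_mod y a
    have hma0 := PySem.Int.mod_nonneg y ha
    split_ifs <;> omega

-- ===== PORT B =====
-- number of u×v tiles in an axis-aligned grid over a w×h region (Source B's helper `grid`)
def pvGrid (w : Int) (h : Int) (u : Int) (v : Int) : Int :=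
  PySem.Int.floordiv h v * PySem.Int.floordiv w u

-- Source B's `while` loop: `total` is the accumulator, a and b are loop constants
def pvFitLoop (a : Int) (b : Int) (x : Int) (y : Int) (total : Int) : Int :=
  if h : 0 < a ∧ 0 < b ∧ a ≤ x ∧ b ≤ y then
    let straight := pvGrid x y a b
    let flipped := pvGrid x y b a
    if straight > flipped then
      pvFitLoop a b (PySem.Int.floordiv x a * a) (PySem.Int.mod y b) (total + straight)
    else
      pvFitLoop a b (PySem.Int.mod x b) (PySem.Int.floordiv y a * a) (total + flipped)
  else total
termination_by ((if b ≤ y then 1 else 0) + (if b ≤ x then 1 else 0) : Nat)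
decreasing_by
  · obtain ⟨ha, hb, hax, hby⟩ := h
    have hmb0 := PySem.Int.mod_nonneg y hb
    have hmb1 := PySem.Int.mod_lt y hb
    have hma := PySem.Int.floordiv_mul_add_mod x a
    have hma0 := PySem.Int.mod_nonneg x ha
    split_ifs <;> omega
  · rename_i hgt
    obtain ⟨ha, hb, hax, hby⟩ := h
    have hcols : 1 ≤ PySem.Int.floordiv y b := by
      rw [PySem.Int.le_floordiv_iff_mul_le hb]; omega
    have hrows : 1 ≤ PySem.Int.floordiv x a := by
      rw [PySem.Int.le_floordiv_iff_mul_le ha]; omega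
    have hts : 1 ≤ PySem.Int.floordiv y b * PySem.Int.floordiv x a := by
      have := mul_le_mul hcols hrows (by norm_num) (by omega)
      simpa using this
    have hfc : 0 ≤ PySem.Int.floordiv y a := by
      rw [PySem.Int.le_floordiv_iff_mul_le ha]; omega
    have hfr : 1 ≤ PySem.Int.floordiv x b := by
      by_contra hcon
      push Not at hcon
      have hfr0 : PySem.Int.floordiv x b ≤ 0 := by omega
      have : PySem.Int.floordiv y a * PySem.Int.floordiv x b ≤ 0 :=
        mul_nonpos_of_nonneg_of_nonpos hfc hfr0
      simp only [straight, flipped, pvGrid] at hgt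
      omega
    have hbx : b ≤ x := by
      have := (PySem.Int.le_floordiv_iff_mul_le hb (q := 1) (a := x)).mp hfr
      omega
    have hmb0 := PySem.Int.mod_nonneg x hb
    have hmb1 := PySem.Int.mod_lt x hb
    have hma := PySem.Int.floordiv_mul_add_mod y a
    have hma0 := PySem.Int.mod_nonneg y ha
    split_ifs <;> omega

def fit_rectangles_alt (x : Int) (y : Int) (a : Int) (b : Int) : Int :=
  pvFitLoop a b x y 0

-- ===== PRECONDITION & SPEC =====
def Spec_fit_rectangles (x : Int) (y : Int) (a : Int) (b : Int) (out : Int) : Prop := out = fit_rectangles_alt x y a b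
instance (x : Int) (y : Int) (a : Int) (b : Int) (out : Int) : Decidable (Spec_fit_rectangles x y a b out) := by unfold Spec_fit_rectangles; infer_instance

-- ===== CLAIM (what is proved, stated in full; the proofs are below) =====
def Claim_equal_fit_rectangles : Prop := ∀ (x : Int) (y : Int) (a : Int) (b : Int), Dom_fit_rectangles x y a b → Spec_fit_rectangles x y a b (fit_rectangles x y a b)

-- ===== LEMMAS AND PROOFS =====

-- one unfolding of A in the region where both guards pass
theorem fitA_step (x y a b : Int) (ha : 0 < a) (hb : 0 < b) (hax : a ≤ x) (hby : b ≤ y) :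
    fit_rectangles x y a b =
      if PySem.Int.floordiv y b * PySem.Int.floordiv x a >
          PySem.Int.floordiv y a * PySem.Int.floordiv x b then
        PySem.Int.floordiv y b * PySem.Int.floordiv x a +
          fit_rectangles (PySem.Int.floordiv x a * a) (y - PySem.Int.floordiv y b * b) a b
      else
        PySem.Int.floordiv y a * PySem.Int.floordiv x b +
          fit_rectangles (x - PySem.Int.floordiv x b * b) (PySem.Int.floordiv y a * a) a b := by
  have g1 : ¬(x ≤ 0 ∨ y ≤ 0 ∨ a ≤ 0 ∨ b ≤ 0) := by omega
  have g2 : ¬(x < a ∨ y < b) := by omega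
  conv_lhs => rw [fit_rectangles.eq_def]
  rw [if_neg g1, if_neg g2]

-- outside the fused loop guard A returns 0 through one of its two guard chains
theorem fitA_zero (x y a b : Int) (h : ¬(0 < a ∧ 0 < b ∧ a ≤ x ∧ b ≤ y)) :
    fit_rectangles x y a b = 0 := by
  rw [fit_rectangles.eq_def]
  by_cases h1 : x ≤ 0 ∨ y ≤ 0 ∨ a ≤ 0 ∨ b ≤ 0
  · rw [if_pos h1]
  · have g2 : (x < a ∨ y < b) := by omega
    rw [if_neg h1, if_pos g2]

-- the loop with accumulator `total` computes `total` plus the recursive A's value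
theorem pvFitLoop_eq (a b x y total : Int) :
    pvFitLoop a b x y total = total + fit_rectangles x y a b := by
  fun_induction pvFitLoop a b x y total with
  | case1 x y total h straight flipped hgt ih =>
    obtain ⟨ha, hb, hax, hby⟩ := h
    simp only [straight, flipped, pvGrid] at hgt ih ⊢
    have e1 : PySem.Int.mod y b = y - PySem.Int.floordiv y b * b := by
      have := PySem.Int.floordiv_mul_add_mod y b; omega
    rw [e1] at ih ⊢
    rw [ih, fitA_step x y a b ha hb hax hby, if_pos hgt]
    ring
  | case2 x y total h straight flipped hgt ih =>
    obtain ⟨ha, hb, hax, hby⟩ := h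
    simp only [straight, flipped, pvGrid] at hgt ih ⊢
    have e2 : PySem.Int.mod x b = x - PySem.Int.floordiv x b * b := by
      have := PySem.Int.floordiv_mul_add_mod x b; omega
    rw [e2] at ih ⊢
    rw [ih, fitA_step x y a b ha hb hax hby, if_neg hgt]
    ring
  | case3 x y total h =>
    rw [fitA_zero x y a b h]
    ring

-- ===== VERDICT (by name: the statement is the Claim_ definition above) =====
theorem fit_rectangles_spec : Claim_equal_fit_rectangles := by
  intro x y a b _
  unfold Spec_fit_rectangles fit_rectangles_alt
  rw [pvFitLoop_eq]
  ring
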